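-- pv_equiv track=rewrite | github.com/AlogluMustafaCan/MaskInfoTestCase | CsvFieldMask.py | replace_with_mask
-- ===== SOURCE A (Python) =====
-- def replace_with_mask(in_word):
--     out_word = ""
--     for char in in_word:
--         if (char != "@") and (char != ",") and (char != ".") and (char != " "):
--             out_word += "X"
--         else:
--             out_word += char
--     return out_word
-- ===== SOURCE B (Python) =====
-- def replace_with_mask(in_word):
--     # Run-length approach: copy kept characters, and collapse each maximal run
--     # of maskable characters into one "X" * run_length chunk, joining at the end.
--     keep = "@,. "
--     parts = []
--     i, n = 0, len(in_word)
--     while i < n: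
--         c = in_word[i]
--         if c in keep:
--             parts.append(c)
--             i += 1
--         else:
--             j = i + 1
--             while j < n and in_word[j] not in keep:
--                 j += 1
--             parts.append("X" * (j - i))
--             i = j
--     return "".join(parts)
-- ===== Notes on version B (the rewrite author's own statement) =====
-- stated objective: alternative
-- what changed: Instead of appending one output character per input character, B scans the string by maximal runs of maskable characters, emitting a single 'X'*run_length chunk per run (kept characters pass through), and joins the chunks at the end.
import Mathlib
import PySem

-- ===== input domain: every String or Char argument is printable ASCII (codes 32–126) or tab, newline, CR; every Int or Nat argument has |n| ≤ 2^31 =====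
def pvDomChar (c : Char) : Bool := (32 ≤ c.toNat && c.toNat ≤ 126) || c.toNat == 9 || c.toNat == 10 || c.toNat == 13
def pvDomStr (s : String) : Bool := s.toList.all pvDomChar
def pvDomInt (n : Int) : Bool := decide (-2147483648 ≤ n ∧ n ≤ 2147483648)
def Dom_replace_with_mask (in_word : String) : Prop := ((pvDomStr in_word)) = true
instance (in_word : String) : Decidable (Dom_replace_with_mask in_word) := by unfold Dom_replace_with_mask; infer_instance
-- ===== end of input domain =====

-- B scans by maximal runs of maskable characters, emitting one 'X'*run chunk per run and joining at the end (alternative decomposition, same cost).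

-- ===== PORT A =====
-- literal port: loop over characters, appending 'X' or the character to an accumulator string
def replace_with_mask (in_word : String) : String :=
  in_word.toList.foldl
    (fun out_word char =>
      if char ≠ '@' ∧ char ≠ ',' ∧ char ≠ '.' ∧ char ≠ ' ' then
        out_word ++ "X"
      else
        out_word.push char)
    ""

-- ===== PORT B =====
-- c in keep (keep = "@,. ")
def pvKeep (c : Char) : Bool := c = '@' || c = ',' || c = '.' || c = ' '

-- the outer while loop over the remaining suffix; the inner run-consuming while loop
-- is ported as takeWhile/dropWhile of the non-keep prefix (same scan, same chunks)
def pvMaskGo (l : List Char) : List String :=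
  match l with
  | [] => []
  | c :: rest =>
    if pvKeep c then
      String.singleton c :: pvMaskGo rest
    else
      let run := rest.takeWhile (fun x => !pvKeep x)
      let rest' := rest.dropWhile (fun x => !pvKeep x)
      String.ofList (List.replicate (1 + run.length) 'X') :: pvMaskGo rest'
termination_by l.length
decreasing_by
  · simp
  · simp only [List.length_cons]
    exact Nat.lt_succ_of_le (List.length_dropWhile_le _ _)

-- "".join(parts)
def replace_with_mask_alt (in_word : String) : String :=
  String.join (pvMaskGo in_word.toList)

-- ===== PRECONDITION & SPEC =====
def Spec_replace_with_mask (in_word : String) (out : String) : Prop := out = replace_with_mask_alt in_word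
instance (in_word : String) (out : String) : Decidable (Spec_replace_with_mask in_word out) := by unfold Spec_replace_with_mask; infer_instance

-- ===== CLAIM (what is proved, stated in full; the proofs are below) =====
def Claim_equal_replace_with_mask : Prop := ∀ (in_word : String), Dom_replace_with_mask in_word → Spec_replace_with_mask in_word (replace_with_mask in_word)

-- ===== LEMMAS AND PROOFS =====
theorem pv_join_toList (ss : List String) (a : String) :
    (ss.foldl (· ++ ·) a).toList = a.toList ++ (ss.map String.toList).flatten := by
  induction ss generalizing a with
  | nil => simp
  | cons s rest ih => simp [List.foldl, ih]

-- A's loop produces the character-wise masked list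
theorem replace_with_mask_foldl (l : List Char) (acc : String) :
    (l.foldl
      (fun out_word char =>
        if char ≠ '@' ∧ char ≠ ',' ∧ char ≠ '.' ∧ char ≠ ' ' then
          out_word ++ "X"
        else
          out_word.push char)
      acc).toList
    = acc.toList ++ l.map (fun c => if pvKeep c then c else 'X') := by
  induction l generalizing acc with
  | nil => simp
  | cons c rest ih =>
    simp only [List.foldl, List.map]
    rw [ih]
    by_cases h : pvKeep c = true
    · have h' : ¬ (c ≠ '@' ∧ c ≠ ',' ∧ c ≠ '.' ∧ c ≠ ' ') := by
        simp [pvKeep] at h; tauto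
      simp [h', h]
    · have h' : c ≠ '@' ∧ c ≠ ',' ∧ c ≠ '.' ∧ c ≠ ' ' := by
        simp [pvKeep] at h; tauto
      simp [h', h]

-- B's run chunks flatten to the same character-wise masked list
theorem pvMaskGo_flatten (l : List Char) :
    ((pvMaskGo l).map String.toList).flatten = l.map (fun c => if pvKeep c then c else 'X') := by
  induction l using pvMaskGo.induct with
  | case1 => simp [pvMaskGo]
  | case2 c rest h ih =>
    simp only [pvMaskGo, h, if_pos, List.map, List.flatten]
    simp [ih, String.singleton]
  | case3 c rest h rest'h ih =>
    set run := rest.takeWhile (fun x => !pvKeep x) with hrundef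
    set restD := rest.dropWhile (fun x => !pvKeep x) with hrestdef
    simp only [pvMaskGo, h, Bool.false_eq_true, if_false, List.map_cons, List.flatten_cons, ← hrundef, ← hrestdef]
    have ih' : ((pvMaskGo restD).map String.toList).flatten
        = restD.map (fun c => if pvKeep c then c else 'X') := ih
    rw [ih']
    have hsplit : run ++ restD = rest := List.takeWhile_append_dropWhile
    have hrun : run.map (fun c => if pvKeep c then c else 'X') = List.replicate run.length 'X' := by
      have hall : ∀ x ∈ run, (if pvKeep x then x else 'X') = 'X' := by
        intro x hx
        have := List.mem_takeWhile_imp hx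
        simp at this
        simp [this]
      calc run.map (fun c => if pvKeep c then c else 'X')
          = run.map (fun _ => 'X') := List.map_congr_left hall
        _ = List.replicate run.length 'X' := by simp
    have key : (c :: rest).map (fun c => if pvKeep c then c else 'X')
        = List.replicate (1 + run.length) 'X' ++ restD.map (fun c => if pvKeep c then c else 'X') := by
      rw [← hsplit]
      simp [h, hrun, List.replicate_add]
    simpa [String.toList_ofList, h] using key.symm

-- ===== VERDICT (by name: the statement is the Claim_ definition above) =====
theorem replace_with_mask_spec : Claim_equal_replace_with_mask := by
  intro in_word _
  unfold Spec_replace_with_mask replace_with_mask replace_with_mask_alt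
  apply String.toList_inj.mp
  rw [replace_with_mask_foldl]
  simp [String.join, pv_join_toList, pvMaskGo_flatten]
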